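-- pv_equiv track=rewrite | github.com/juul369/Wavefusion-model-for-classifying-metacognitive-sensitivity | dataset.py | patient_dictionary
-- ===== SOURCE A (Python) =====
-- def patient_dictionary(samples):
--     subject_id = {}
--     id = 0
--     for i in range(len(samples)):
--         tmp = samples[i][0].split("/")[-1].split("_")
--         key = tmp[0]
--         if key not in subject_id.keys():
--             subject_id[key] = id
--             id += 1
--     return subject_id
-- ===== SOURCE B (Python) =====
-- def patient_dictionary(samples):
--     keys = [s[0].split("/")[-1].split("_")[0] for s in samples]
--     firsts = sorted({keys.index(k) for k in keys})
--     return {keys[j]: r for r, j in enumerate(firsts)}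
-- ===== Notes on version B (the rewrite author's own statement) =====
-- stated objective: alternative
-- what changed: Replaces A's incremental membership-test-and-counter dict loop by a position-based algorithm: compute the set of first-occurrence positions of the extracted key prefixes, sort it, and map each position back to its key with its rank.
import Mathlib
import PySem

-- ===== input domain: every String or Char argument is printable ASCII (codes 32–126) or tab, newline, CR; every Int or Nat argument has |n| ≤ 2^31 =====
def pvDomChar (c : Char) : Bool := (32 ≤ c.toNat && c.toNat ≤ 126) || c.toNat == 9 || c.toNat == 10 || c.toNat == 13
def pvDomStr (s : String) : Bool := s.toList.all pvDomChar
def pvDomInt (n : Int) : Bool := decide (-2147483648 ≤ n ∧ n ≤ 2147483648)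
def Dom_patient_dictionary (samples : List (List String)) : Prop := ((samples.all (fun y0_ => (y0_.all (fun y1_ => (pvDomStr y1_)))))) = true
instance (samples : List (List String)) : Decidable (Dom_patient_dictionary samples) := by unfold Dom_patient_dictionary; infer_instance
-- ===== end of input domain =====

-- B replaces A's incremental dict-with-counter loop by an index-based algorithm: it computes the
-- first-occurrence POSITION of each key, sorts that set of positions, and maps each position back
-- to its key with its rank; objective: alternative (same result by a sort-then-rank strategy).

-- shared key extraction: s[0].split("/")[-1].split("_")[0]
-- (s[0] would raise IndexError on an empty row; Pre_ excludes empty rows, the default "" is never used inside Pre_)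
-- split? returns none only for an empty separator; here the separators are the literals "/" and "_",
-- so the .getD [] default is never taken and this is exactly Python's str.split.
def pvKey (x : List String) : String :=
  PySem.List.pyGetD
    ((PySem.Str.split?
      (PySem.List.pyGetD ((PySem.Str.split? (PySem.List.pyGetD x 0 "") "/").getD []) (-1) "")
      "_").getD [])
    0 ""

-- ===== PORT A =====
def patient_dictionary (samples : List (List String)) : List (String × Int) :=
  (samples.foldl
    (fun (st : PySem.Dict String Int × Int) x =>
      let key := pvKey x
      if st.1.contains key then st else (st.1.insert key st.2, st.2 + 1))
    ((PySem.Dict.empty : PySem.Dict String Int), (0 : Int))).1.items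

-- ===== PORT B =====
-- keys.index(k): k is always an element of keys here, so Python never raises ValueError and the
-- .getD 0 default of index? is never taken.
def pvFirst (keys : List String) (k : String) : Int :=
  (((PySem.List.index? keys k).getD 0 : Nat) : Int)

def patient_dictionary_alt (samples : List (List String)) : List (String × Int) :=
  let keys := samples.map pvKey
  let firsts := PySem.List.sorted (PySem.Set.ofList (keys.map (pvFirst keys))) (fun x => x) false
  (PySem.List.enumerate firsts 0).map (fun p => (PySem.List.pyGetD keys p.2 "", p.1))

-- ===== PRECONDITION & SPEC =====
-- Pre_ excludes exactly the rows on which Python's samples[i][0] raises IndexError: empty inner lists.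
def Pre_patient_dictionary (samples : List (List String)) : Prop := ∀ x ∈ samples, x ≠ []
instance (samples : List (List String)) : Decidable (Pre_patient_dictionary samples) := by unfold Pre_patient_dictionary; infer_instance

def pvWitness_patient_dictionary : List (List String) :=
  [["data/p1_a.wav"], ["data/p2_b.wav", "x"], ["other/p1_c.wav"]]

def Spec_patient_dictionary (samples : List (List String)) (out : List (String × Int)) : Prop := out = patient_dictionary_alt samples
instance (samples : List (List String)) (out : List (String × Int)) : Decidable (Spec_patient_dictionary samples out) := by unfold Spec_patient_dictionary; infer_instance

-- ===== CLAIM (what is proved, stated in full; the proofs are below) =====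
def Claim_equal_patient_dictionary : Prop := ∀ (samples : List (List String)), Dom_patient_dictionary samples → Pre_patient_dictionary samples → Spec_patient_dictionary samples (patient_dictionary samples)

-- ===== LEMMAS AND PROOFS =====

-- invariant of A's loop: the dict's items are exactly the swap-enumeration of its key list s,
-- and the running counter equals s.length; then the loop over keys mirrors Set.add on s.
lemma pv_loop_spec (ks : List String) :
    ∀ (s : List String) (d : PySem.Dict String Int),
      d.keys = s →
      d.items = (PySem.List.enumerate s 0).map (fun p => (p.2, p.1)) →
      (ks.foldl
        (fun (st : PySem.Dict String Int × Int) k =>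
          if st.1.contains k then st else (st.1.insert k st.2, st.2 + 1))
        (d, (s.length : Int))).1.items
        = (PySem.List.enumerate (ks.foldl PySem.Set.add s) 0).map (fun p => (p.2, p.1)) := by
  induction ks with
  | nil => intro s d hk hi; simpa using hi
  | cons k rest ih =>
    intro s d hk hi
    by_cases hmem : k ∈ s
    · have hc : d.contains k = true := by
        rw [PySem.Dict.contains_eq_decide_mem_keys, hk]; simpa using hmem
      have hadd : PySem.Set.add s k = s := by
        simp [PySem.Set.add, PySem.Set.contains, hmem]
      simp only [List.foldl_cons, hc, if_true, hadd]
      exact ih s d hk hi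
    · have hc : d.contains k = false := by
        rw [PySem.Dict.contains_eq_decide_mem_keys, hk]; simpa using hmem
      have hadd : PySem.Set.add s k = s ++ [k] := by
        simp [PySem.Set.add, PySem.Set.contains, hmem]
      simp only [List.foldl_cons, hc, if_false, Bool.false_eq_true, hadd]
      have hk' : (d.insert k (s.length : Int)).keys = s ++ [k] := by
        rw [PySem.Dict.keys_insert_of_not_contains d _ hc, hk]
      have hi' : (d.insert k (s.length : Int)).items
          = (PySem.List.enumerate (s ++ [k]) 0).map (fun p => (p.2, p.1)) := by
        rw [PySem.Dict.items_insert_of_not_contains d _ hc, hi,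
            PySem.List.enumerate_append]
        simp [PySem.List.enumerate]
      have hlen : ((s.length : Int) + 1) = (((s ++ [k]).length : Nat) : Int) := by
        simp
      rw [hlen]
      exact ih (s ++ [k]) (d.insert k (s.length : Int)) hk' hi'

-- first-occurrence positions take the element back: keys[first(k)] = k for k ∈ keys
lemma pv_get_first (keys : List String) (k : String) (hk : k ∈ keys) :
    PySem.List.pyGetD keys (pvFirst keys k) "" = k := by
  obtain ⟨i, hi⟩ := Option.isSome_iff_exists.mp ((PySem.List.index?_isSome_iff keys k).mpr hk)
  obtain ⟨hlt, hget, -⟩ := PySem.List.getElem_of_index?_eq_some hi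
  simp only [pvFirst, hi, Option.getD_some, PySem.List.pyGetD_natCast]
  simp [List.getD, List.getElem?_eq_getElem hlt, hget]

-- first-occurrence positions are injective on the members of keys
lemma pv_first_inj (keys : List String) {a b : String} (ha : a ∈ keys) (hb : b ∈ keys)
    (h : pvFirst keys a = pvFirst keys b) : a = b := by
  have := pv_get_first keys a ha
  rw [h, pv_get_first keys b hb] at this
  exact this.symm

-- every first-occurrence position is below the length
lemma pv_first_lt (keys : List String) (k : String) (hk : k ∈ keys) :
    pvFirst keys k < (keys.length : Int) := by
  obtain ⟨i, hi⟩ := Option.isSome_iff_exists.mp ((PySem.List.index?_isSome_iff keys k).mpr hk)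
  obtain ⟨hlt, -, -⟩ := PySem.List.getElem_of_index?_eq_some hi
  simp only [pvFirst, hi, Option.getD_some]
  exact_mod_cast hlt

-- appending an element does not change the first-occurrence position of existing elements
lemma pv_first_append (keys t : List String) (k : String) (hk : k ∈ keys) :
    pvFirst (keys ++ t) k = pvFirst keys k := by
  simp only [pvFirst, PySem.List.index?_append_of_mem t hk]

-- the key list produced by A's order (first appearance) is strictly increasing in first index
lemma pv_dedup_pairwise (keys : List String) :
    (PySem.List.dedup keys).Pairwise (fun a b => pvFirst keys a < pvFirst keys b) := by
  induction keys using List.reverseRecOn with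
  | nil => simp [PySem.List.dedup]
  | append_singleton l k ih =>
    have hof : PySem.List.dedup (l ++ [k]) = PySem.Set.add (PySem.List.dedup l) k := by
      simp [PySem.List.dedup_eq_ofList, PySem.Set.ofList_eq_foldl]
    by_cases hmem : k ∈ l
    · have : PySem.Set.add (PySem.List.dedup l) k = PySem.List.dedup l := by
        simp [PySem.Set.add, PySem.Set.contains, hmem]
      rw [hof, this]
      refine ih.imp_of_mem ?_
      intro a b ha hb hab
      rw [pv_first_append l [k] a ((PySem.List.mem_dedup _ _).mp ha),
          pv_first_append l [k] b ((PySem.List.mem_dedup _ _).mp hb)]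
      exact hab
    · have : PySem.Set.add (PySem.List.dedup l) k = PySem.List.dedup l ++ [k] := by
        simp [PySem.Set.add, PySem.Set.contains, hmem]
      rw [hof, this]
      rw [List.pairwise_append]
      refine ⟨?_, by simp, ?_⟩
      · refine ih.imp_of_mem ?_
        intro a b ha hb hab
        rw [pv_first_append l [k] a ((PySem.List.mem_dedup _ _).mp ha),
            pv_first_append l [k] b ((PySem.List.mem_dedup _ _).mp hb)]
        exact hab
      · intro a ha b hb
        rw [List.mem_singleton] at hb
        rw [hb]
        have ha' : a ∈ l := (PySem.List.mem_dedup _ _).mp ha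
        rw [pv_first_append l [k] a ha']
        have hk' : pvFirst (l ++ [k]) k = (l.length : Int) := by
          simp only [pvFirst, PySem.List.index?_append_singleton_self l k hmem, Option.getD_some]
        rw [hk']
        exact pv_first_lt l a ha'

-- sorting the set of first positions reproduces the first-appearance order
lemma pv_sorted_firsts (keys : List String) :
    PySem.List.sorted (PySem.Set.ofList (keys.map (pvFirst keys))) (fun x => x) false
      = (PySem.List.dedup keys).map (pvFirst keys) := by
  apply PySem.List.sorted_eq_of_perm_of_pairwise_lt
  · -- permutation: both are nodup lists with the same members
    rw [List.perm_ext_iff_of_nodup ?_ (PySem.Set.nodup_ofList _)]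
    · intro x
      simp only [PySem.Set.mem_ofList, List.mem_map, PySem.List.mem_dedup]
    · exact (PySem.List.nodup_dedup keys).map_on
        (fun a ha b hb h => pv_first_inj keys ((PySem.List.mem_dedup _ _).mp ha) ((PySem.List.mem_dedup _ _).mp hb) h)
  · exact List.Pairwise.map (pvFirst keys) (fun _ _ h => h) (pv_dedup_pairwise keys)

-- enumerate of a mapped list
lemma pv_enumerate_map {α β : Type} (f : α → β) (l : List α) (s : Int) :
    PySem.List.enumerate (l.map f) s = (PySem.List.enumerate l s).map (fun p => (p.1, f p.2)) := by
  induction l generalizing s with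
  | nil => simp [PySem.List.enumerate_nil]
  | cons x xs ih => simp [PySem.List.enumerate_cons, ih]

-- ===== VERDICT (by name: the statement is the Claim_ definition above) =====
theorem patient_dictionary_spec : Claim_equal_patient_dictionary := by
  intro samples _ _
  unfold Spec_patient_dictionary patient_dictionary patient_dictionary_alt
  have hA := pv_loop_spec (samples.map pvKey) [] (PySem.Dict.empty)
    (by simp) (by simp [PySem.List.enumerate, PySem.Dict.empty])
  rw [List.foldl_map] at hA
  have hA' : (samples.foldl
      (fun (st : PySem.Dict String Int × Int) x =>
        let key := pvKey x
        if st.1.contains key then st else (st.1.insert key st.2, st.2 + 1))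
      ((PySem.Dict.empty : PySem.Dict String Int), (0 : Int))).1.items
      = (PySem.List.enumerate (PySem.List.dedup (samples.map pvKey)) 0).map (fun p => (p.2, p.1)) := by
    simpa [PySem.List.dedup_eq_ofList, PySem.Set.ofList_eq_foldl] using hA
  rw [hA']
  show _ = (PySem.List.enumerate (PySem.List.sorted
      (PySem.Set.ofList ((samples.map pvKey).map (pvFirst (samples.map pvKey)))) (fun x => x) false) 0).map
      (fun p => (PySem.List.pyGetD (samples.map pvKey) p.2 "", p.1))
  rw [pv_sorted_firsts, pv_enumerate_map, List.map_map]
  apply List.map_congr_left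
  intro p hp
  obtain ⟨k, hk, rfl⟩ := (PySem.List.mem_enumerate_iff _ _ _).mp hp
  have hmem : (PySem.List.dedup (samples.map pvKey))[k] ∈ samples.map pvKey :=
    (PySem.List.mem_dedup _ _).mp (List.getElem_mem hk)
  simp only [Function.comp_apply]
  rw [pv_get_first _ _ hmem]
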